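-- pv_equiv track=rewrite | github.com/swarka7/CodeScope | src/codescope/retrieval/dependency_aware.py | _query_mentions_tests
-- ===== SOURCE A (Python) =====
-- def _query_mentions_tests(query: str) -> bool:
--     keywords = {"test", "tests", "testing", "pytest"}
--     tokens: list[str] = []
--     current: list[str] = []
--
--     for ch in query.lower():
--         if ch.isalnum():
--             current.append(ch)
--             continue
--         if current:
--             tokens.append("".join(current))
--             current = []
--
--     if current:
--         tokens.append("".join(current))
--
--     return any(token in keywords for token in tokens)
-- ===== SOURCE B (Python) =====
-- def _query_mentions_tests(query: str) -> bool:
--     keywords = {"test", "tests", "testing", "pytest"}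
--     s = query.lower()
--     i, n = 0, len(s)
--     while i < n:
--         if not s[i].isalnum():
--             i += 1
--             continue
--         j = i + 1
--         while j < n and s[j].isalnum():
--             j += 1
--         if s[i:j] in keywords:
--             return True
--         i = j
--     return False
-- ===== Notes on version B (the rewrite author's own statement) =====
-- stated objective: alternative
-- what changed: Replaces A's buffer state machine that first builds the full token list (with a post-loop flush) and then scans it with any(), by an index-based span scanner that extracts each maximal alnum run in place and returns True immediately when a run is a keyword.
import Mathlib
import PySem

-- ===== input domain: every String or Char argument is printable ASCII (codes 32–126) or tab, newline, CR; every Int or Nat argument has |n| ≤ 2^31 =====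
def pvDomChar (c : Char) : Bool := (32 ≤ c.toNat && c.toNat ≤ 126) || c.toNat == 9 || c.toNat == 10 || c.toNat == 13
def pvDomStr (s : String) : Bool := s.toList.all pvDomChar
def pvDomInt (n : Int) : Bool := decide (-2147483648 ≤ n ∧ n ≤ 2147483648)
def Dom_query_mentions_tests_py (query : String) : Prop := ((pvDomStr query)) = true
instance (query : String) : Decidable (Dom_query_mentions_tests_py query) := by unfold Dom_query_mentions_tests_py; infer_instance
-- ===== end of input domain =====

-- B replaces A's buffer state machine + post-loop flush + any() over the collected token
-- list by an in-place span scanner with early exit; same cost, different decomposition.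

-- the keyword set {"test","tests","testing","pytest"} (distinct elements)
def pvKeywords : List (List Char) :=
  [['t','e','s','t'], ['t','e','s','t','s'], ['t','e','s','t','i','n','g'],
   ['p','y','t','e','s','t']]

-- ===== PORT A =====
-- the loop body: state = (tokens, current)
def pvStepA (acc : List (List Char) × List Char) (ch : Char) :
    List (List Char) × List Char :=
  if PySem.Chars.isalnum ch then (acc.1, acc.2 ++ [ch])
  else if !acc.2.isEmpty then (acc.1 ++ [acc.2], [])
  else acc

def query_mentions_tests_py (query : String) : Bool :=
  let st := (PySem.Chars.lower query.toList).foldl pvStepA ([], [])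
  let tokens := if !st.2.isEmpty then st.1 ++ [st.2] else st.1
  tokens.any (fun t => pvKeywords.contains t)

-- ===== PORT B =====
-- B's outer while loop: skip a non-alnum char, or take the maximal alnum run
-- starting here (inner while j loop = takeWhile/dropWhile), test it, continue after it.
def pvScanB : List Char → Bool
  | [] => false
  | c :: rest =>
    if !(PySem.Chars.isalnum c) then pvScanB rest
    else
      pvKeywords.contains (c :: rest.takeWhile PySem.Chars.isalnum)
        || pvScanB (rest.dropWhile PySem.Chars.isalnum)
termination_by l => l.length
decreasing_by
  · simp
  · have := List.length_dropWhile_le (p := PySem.Chars.isalnum) (l := rest)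
    simp
    omega

def query_mentions_tests_py_alt (query : String) : Bool :=
  pvScanB (PySem.Chars.lower query.toList)

-- ===== PRECONDITION & SPEC =====
def Spec_query_mentions_tests_py (query : String) (out : Bool) : Prop := out = query_mentions_tests_py_alt query
instance (query : String) (out : Bool) : Decidable (Spec_query_mentions_tests_py query out) := by unfold Spec_query_mentions_tests_py; infer_instance

-- ===== CLAIM (what is proved, stated in full; the proofs are below) =====
def Claim_equal_query_mentions_tests_py : Prop := ∀ (query : String), Dom_query_mentions_tests_py query → Spec_query_mentions_tests_py query (query_mentions_tests_py query)

-- ===== LEMMAS AND PROOFS =====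

-- streaming view of A: pending buffer `cur`, remaining input
def pvG (cur : List Char) : List Char → Bool
  | [] => !cur.isEmpty && pvKeywords.contains cur
  | c :: l =>
    if PySem.Chars.isalnum c then pvG (cur ++ [c]) l
    else ((!cur.isEmpty && pvKeywords.contains cur) || pvG [] l)

theorem pvA_eq_G (l : List Char) :
    ∀ (tokens : List (List Char)) (cur : List Char),
    (let st := l.foldl pvStepA (tokens, cur)
     (if !st.2.isEmpty then st.1 ++ [st.2] else st.1).any
       (fun t => pvKeywords.contains t))
    = (tokens.any (fun t => pvKeywords.contains t) || pvG cur l) := by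
  induction l with
  | nil =>
    intro tokens cur
    by_cases h : cur.isEmpty <;> simp [pvG, h]
  | cons c l ih =>
    intro tokens cur
    simp only [List.foldl_cons]
    by_cases hc : PySem.Chars.isalnum c
    · rw [show pvStepA (tokens, cur) c = (tokens, cur ++ [c]) by simp [pvStepA, hc]]
      rw [ih]
      simp [pvG, hc]
    · by_cases hcur : cur.isEmpty
      · rw [show pvStepA (tokens, cur) c = (tokens, cur) by simp [pvStepA, hc, hcur]]
        rw [ih]
        have hnil : cur = [] := by simpa [List.isEmpty_iff] using hcur
        simp [pvG, hc, hnil]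
      · rw [show pvStepA (tokens, cur) c = (tokens ++ [cur], []) by simp [pvStepA, hc, hcur]]
        rw [ih]
        simp [pvG, hc, hcur, Bool.or_assoc]

theorem pvG_flush (l : List Char) :
    ∀ (cur : List Char), cur ≠ [] →
    pvG cur l = (pvKeywords.contains (cur ++ l.takeWhile PySem.Chars.isalnum)
                  || pvG [] (l.dropWhile PySem.Chars.isalnum)) := by
  induction l with
  | nil =>
    intro cur h
    simp [pvG, h]
  | cons c l ih =>
    intro cur h
    by_cases hc : PySem.Chars.isalnum c
    · rw [show pvG cur (c :: l) = pvG (cur ++ [c]) l by simp [pvG, hc]]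
      rw [ih (cur ++ [c]) (by simp)]
      simp [hc]
    · rw [show pvG cur (c :: l) = ((!cur.isEmpty && pvKeywords.contains cur) || pvG [] l)
            by simp [pvG, hc]]
      rw [List.takeWhile_cons_of_neg (by simp [hc]), List.dropWhile_cons_of_neg (by simp [hc])]
      rw [show pvG [] (c :: l) = pvG [] l by simp [pvG, hc]]
      have he : cur.isEmpty = false := by simpa [List.isEmpty_iff] using h
      simp [he]

theorem pvG_eq_scanB (n : ℕ) : ∀ (l : List Char), l.length ≤ n → pvG [] l = pvScanB l := by
  induction n with
  | zero =>
    intro l h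
    have : l = [] := by cases l <;> simp_all
    simp [this, pvG, pvScanB]
  | succ n ih =>
    intro l h
    cases l with
    | nil => simp [pvG, pvScanB]
    | cons c l =>
      by_cases hc : PySem.Chars.isalnum c
      · have hd : (l.dropWhile PySem.Chars.isalnum).length ≤ n := by
          have := List.length_dropWhile_le (p := PySem.Chars.isalnum) (l := l)
          simp at h; omega
        rw [pvScanB]
        rw [show pvG [] (c :: l) = pvG [c] l by simp [pvG, hc]]
        rw [pvG_flush l [c] (by simp), ih _ hd]
        simp [hc]
      · rw [pvScanB]
        rw [show pvG [] (c :: l) = pvG [] l by simp [pvG, hc]]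
        rw [ih l (by simp at h; omega)]
        simp [hc]

-- ===== VERDICT (by name: the statement is the Claim_ definition above) =====
theorem query_mentions_tests_py_spec : Claim_equal_query_mentions_tests_py := by
  intro query _
  unfold Spec_query_mentions_tests_py query_mentions_tests_py query_mentions_tests_py_alt
  rw [pvA_eq_G]
  simp [pvG_eq_scanB (PySem.Chars.lower query.toList).length _ le_rfl]
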